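-- pv_equiv track=rewrite | github.com/eruroueaito/news_analyzer | news_analyzer/news_analyzer/processing/clusterer.py | _dedup_prefix_keywords
-- ===== SOURCE A (Python) =====
-- def _dedup_prefix_keywords(keywords: list[str]) -> list[str]:
--     """
--     移除关键词列表中的近似重复词。
--
--     若词 B 以词 A 开头（且 A 长度 >= 4），则认为 B 是 A 的派生形式，
--     保留 A（较短/更通用），丢弃 B。例如：
--         ["america", "american"] → ["america"]
--         ["iran", "iranian"]     → ["iran"]
--     """
--     result: list[str] = []
--     for kw in keywords:
--         dominated = any(
--             len(existing) >= 4 and kw.startswith(existing) and kw != existing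
--             for existing in result
--         )
--         if not dominated:
--             result.append(kw)
--     return result
-- ===== SOURCE B (Python) =====
-- def _dedup_prefix_keywords(keywords: list[str]) -> list[str]:
--     # Check each keyword's own proper prefixes (length >= 4) against a hash set
--     # of kept long keywords, instead of scanning the whole kept list each time.
--     result: list[str] = []
--     kept4: set[str] = set()
--     for kw in keywords:
--         n = len(kw)
--         if not any(kw[:l] in kept4 for l in range(4, n)):
--             result.append(kw)
--             if n >= 4:
--                 kept4.add(kw)
--     return result
-- ===== Notes on version B (the rewrite author's own statement) =====
-- stated objective: faster
-- what changed: Instead of scanning the whole kept list for a dominating keyword on every iteration, B keeps a hash set of kept keywords of length >= 4 and tests each keyword's own proper prefixes of length >= 4 against it.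
import Mathlib
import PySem

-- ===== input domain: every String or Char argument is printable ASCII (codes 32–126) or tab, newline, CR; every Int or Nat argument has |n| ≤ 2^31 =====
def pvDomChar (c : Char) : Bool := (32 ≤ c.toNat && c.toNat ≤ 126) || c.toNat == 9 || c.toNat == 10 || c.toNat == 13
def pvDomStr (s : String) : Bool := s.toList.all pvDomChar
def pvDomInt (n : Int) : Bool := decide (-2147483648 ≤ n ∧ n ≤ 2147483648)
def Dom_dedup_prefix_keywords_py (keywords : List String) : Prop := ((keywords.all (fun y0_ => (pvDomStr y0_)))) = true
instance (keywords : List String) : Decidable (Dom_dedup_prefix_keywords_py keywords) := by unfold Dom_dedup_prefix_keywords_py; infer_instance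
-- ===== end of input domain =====

-- B replaces A's inner scan over all kept keywords by a hash-set lookup of each
-- keyword's own proper prefixes of length ≥ 4 (objective: faster per-keyword check).

-- ===== PORT A =====
def dedup_prefix_keywords_py (keywords : List String) : List String :=
  keywords.foldl (fun result kw =>
    let dominated := result.any (fun existing =>
      decide (4 ≤ PySem.Str.len existing) && PySem.Str.startswith kw existing && (kw != existing))
    if dominated then result else result ++ [kw]) []

-- ===== PORT B =====
def dedup_prefix_keywords_py_alt (keywords : List String) : List String :=
  (keywords.foldl (fun (s : List String × PySem.Set String) kw =>
      let n := PySem.Str.len kw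
      if (PySem.List.pyRange 4 n).any
          (fun l => PySem.Set.contains s.2 (PySem.Str.slice kw none (some l))) then s
      else (s.1 ++ [kw], if 4 ≤ n then PySem.Set.add s.2 kw else s.2))
    ([], PySem.Set.empty)).1

-- ===== PRECONDITION & SPEC =====
def Spec_dedup_prefix_keywords_py (keywords : List String) (out : List String) : Prop := out = dedup_prefix_keywords_py_alt keywords
instance (keywords : List String) (out : List String) : Decidable (Spec_dedup_prefix_keywords_py keywords out) := by unfold Spec_dedup_prefix_keywords_py; infer_instance

-- ===== CLAIM (what is proved, stated in full; the proofs are below) =====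
def Claim_equal_dedup_prefix_keywords_py : Prop := ∀ (keywords : List String), Dom_dedup_prefix_keywords_py keywords → Spec_dedup_prefix_keywords_py keywords (dedup_prefix_keywords_py keywords)

-- ===== LEMMAS AND PROOFS =====

-- A's "dominated" test equals B's prefix-set test, given the set invariant.
lemma pv_dom_eq (kw : String) (res : List String) (st : PySem.Set String)
    (hinv : ∀ x, x ∈ st ↔ x ∈ res ∧ 4 ≤ PySem.Str.len x) :
    res.any (fun existing =>
      decide (4 ≤ PySem.Str.len existing) && PySem.Str.startswith kw existing && (kw != existing))
    = (PySem.List.pyRange 4 (PySem.Str.len kw)).any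
        (fun l => PySem.Set.contains st (PySem.Str.slice kw none (some l))) := by
  rw [Bool.eq_iff_iff]
  simp only [List.any_eq_true, Bool.and_eq_true, decide_eq_true_eq, bne_iff_ne, ne_eq,
    PySem.Set.contains, List.contains_iff_mem, PySem.List.mem_pyRange_one]
  constructor
  · rintro ⟨e, he, ⟨hlen, hsw⟩, hne⟩
    have hpre : e.toList <+: kw.toList := by
      rw [PySem.Str.startswith_eq, PySem.Chars.startswith_iff] at hsw; exact hsw
    have hle : e.toList.length ≤ kw.toList.length := hpre.length_le
    have hlt : e.toList.length < kw.toList.length := by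
      rcases lt_or_eq_of_le hle with h | h
      · exact h
      · exact absurd (String.toList_inj.mp (List.prefix_iff_eq_take.mp hpre ▸
          (h ▸ List.take_length (l := kw.toList)).symm ▸ rfl)).symm hne
    refine ⟨(e.toList.length : Int), ⟨?_, ?_⟩, ?_⟩
    · have := PySem.Str.len_eq e; omega
    · have := PySem.Str.len_eq kw; omega
    · have hsl : (PySem.Str.slice kw none (some (e.toList.length : Int))).toList = e.toList := by
        rw [PySem.Str.toList_slice, PySem.Chars.slice_eq_listSlice,
          PySem.List.slice_to_natCast, ← List.prefix_iff_eq_take.mp hpre]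
      rw [String.toList_inj.mp hsl, hinv]
      exact ⟨he, hlen⟩
  · rintro ⟨l, ⟨h4, hlt⟩, hmem⟩
    set p := PySem.Str.slice kw none (some l) with hp
    obtain ⟨hres, hplen⟩ := (hinv p).mp hmem
    have hlen_kw := PySem.Str.len_eq kw
    have hptl : p.toList = kw.toList.take l.toNat := by
      rw [hp, PySem.Str.toList_slice, PySem.Chars.slice_eq_listSlice,
        PySem.List.slice_to _ (by omega)]
    have hplen' : p.toList.length = l.toNat := by
      rw [hptl, List.length_take]; omega
    refine ⟨p, hres, ⟨?_, ?_⟩, ?_⟩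
    · have := PySem.Str.len_eq p; omega
    · rw [PySem.Str.startswith_eq, PySem.Chars.startswith_iff, hptl]
      exact List.take_prefix _ _
    · intro hkp
      have h2 : kw.toList.length = p.toList.length := by rw [hkp]
      omega

-- Loop invariant: running A's loop and B's loop from related states gives the same result.
lemma pv_loop_eq (ks : List String) (res : List String) (st : PySem.Set String)
    (hinv : ∀ x, x ∈ st ↔ x ∈ res ∧ 4 ≤ PySem.Str.len x) :
    ks.foldl (fun result kw =>
      let dominated := result.any (fun existing =>
        decide (4 ≤ PySem.Str.len existing) && PySem.Str.startswith kw existing && (kw != existing))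
      if dominated then result else result ++ [kw]) res
    = (ks.foldl (fun (s : List String × PySem.Set String) kw =>
        let n := PySem.Str.len kw
        if (PySem.List.pyRange 4 n).any
            (fun l => PySem.Set.contains s.2 (PySem.Str.slice kw none (some l))) then s
        else (s.1 ++ [kw], if 4 ≤ n then PySem.Set.add s.2 kw else s.2)) (res, st)).1 := by
  induction ks generalizing res st with
  | nil => rfl
  | cons kw ks ih =>
    simp only [List.foldl_cons]
    rw [pv_dom_eq kw res st hinv]
    by_cases hd : (PySem.List.pyRange 4 (PySem.Str.len kw)).any
        (fun l => PySem.Set.contains st (PySem.Str.slice kw none (some l))) = true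
    · simp only [hd, if_true]
      exact ih res st hinv
    · simp only [Bool.not_eq_true] at hd
      simp only [hd, Bool.false_eq_true, if_false]
      apply ih
      intro x
      by_cases h4 : 4 ≤ PySem.Str.len kw
      · simp only [h4, if_true, PySem.Set.mem_add, hinv, List.mem_append, List.mem_singleton]
        constructor
        · rintro (⟨hx, hl⟩ | rfl)
          · exact ⟨Or.inl hx, hl⟩
          · exact ⟨Or.inr rfl, h4⟩
        · rintro ⟨hx | rfl, hl⟩
          · exact Or.inl ⟨hx, hl⟩
          · exact Or.inr rfl
      · simp only [h4, if_false, hinv, List.mem_append, List.mem_singleton]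
        constructor
        · rintro ⟨hx, hl⟩; exact ⟨Or.inl hx, hl⟩
        · rintro ⟨hx | rfl, hl⟩
          · exact ⟨hx, hl⟩
          · exact absurd hl h4

-- ===== VERDICT (by name: the statement is the Claim_ definition above) =====
theorem dedup_prefix_keywords_py_spec : Claim_equal_dedup_prefix_keywords_py := by
  intro keywords _
  show dedup_prefix_keywords_py keywords = dedup_prefix_keywords_py_alt keywords
  unfold dedup_prefix_keywords_py dedup_prefix_keywords_py_alt
  exact pv_loop_eq keywords [] PySem.Set.empty (by intro x; simp [PySem.Set.empty])
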